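-- pv_equiv track=rewrite | github.com/iansedano/aoc | python/src/aoc/y_2025/d_02/solution.py | is_valid_plus
-- ===== SOURCE A (Python) =====
-- def is_valid_plus(id):
--     """
--     >>> is_valid_plus(123123)
--     False
--     >>> is_valid_plus(11)
--     False
--     >>> is_valid_plus(110110)
--     False
--     >>> is_valid_plus(239009)
--     True
--     >>> is_valid_plus(999)
--     False
--     >>> is_valid_plus(565656)
--     False
--     >>> is_valid_plus(824824824)
--     False
--     >>> is_valid_plus(2121212121)
--     False
--     >>> is_valid_plus(111)
--     False
--     """
--
--     id_str = str(id)
--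
--     length = len(id_str)
--
--     max_length = length // 2
--
--     for seq_len in range(1, max_length + 1):
--         if similar_segments(id_str, seq_len):
--             return False
--
--     return True
--
-- def similar_segments(id_str, seq_len):
--     """
--     >>> similar_segments("2121212121", 2)
--     True
--     """
--     length = len(id_str)
--
--     if length % seq_len != 0:
--         return False
--
--     number_of_segments = length // seq_len
--
--     segments = set()
--
--     for x in range(number_of_segments):
--         start = x * seq_len
--         end = start + seq_len
--
--         segments.add(id_str[start:end])
--         # try:
--         #     segments.add(id_str[start:end])
--         # except IndexError:
--         #     return False
--
--     if len(segments) == 1: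
--         return True
-- ===== SOURCE B (Python) =====
-- def is_valid_plus(id):
--     id_str = str(id)
--     return id_str not in (id_str + id_str)[1:-1]
-- ===== Notes on version B (the rewrite author's own statement) =====
-- stated objective: idiomatic
-- what changed: Replaced A's loop over every candidate segment length (divisibility check plus building a set of all segments) by the classic one-line string-periodicity identity: s is a repetition of a shorter block iff s occurs in (s+s)[1:-1].
import Mathlib
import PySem

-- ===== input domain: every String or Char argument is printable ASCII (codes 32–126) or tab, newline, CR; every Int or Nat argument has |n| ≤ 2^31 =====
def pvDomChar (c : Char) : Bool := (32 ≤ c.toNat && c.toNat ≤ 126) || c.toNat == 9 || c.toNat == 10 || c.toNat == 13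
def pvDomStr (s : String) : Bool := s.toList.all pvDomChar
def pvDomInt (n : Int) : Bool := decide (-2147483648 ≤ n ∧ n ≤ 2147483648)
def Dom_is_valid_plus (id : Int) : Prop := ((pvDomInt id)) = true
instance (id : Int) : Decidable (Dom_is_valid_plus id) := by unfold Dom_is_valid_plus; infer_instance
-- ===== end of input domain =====

-- B replaces A's loop over candidate segment lengths by the classic periodicity identity
-- "s is a repetition of a shorter block iff s occurs in (s+s)[1:-1]" (objective: idiomatic).

-- ===== PORT A =====
def similar_segments (id_str : List Char) (seq_len : Int) : Bool :=
  let length : Int := (id_str.length : Int)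
  if PySem.Int.mod length seq_len ≠ 0 then false
  else
    let number_of_segments := PySem.Int.floordiv length seq_len
    let segments : PySem.Set (List Char) :=
      (PySem.List.pyRange 0 number_of_segments 1).foldl
        (fun s x =>
          let start := x * seq_len
          let stop := start + seq_len
          s.add (PySem.List.slice id_str (some start) (some stop)))
        (PySem.Set.ofList [])
    if segments.length = 1 then true else false

def is_valid_plus (id : Int) : Bool :=
  let id_str := PySem.Int.toChars id
  let length : Int := (id_str.length : Int)
  let max_length := PySem.Int.floordiv length 2
  if (PySem.List.pyRange 1 (max_length + 1) 1).any (fun seq_len => similar_segments id_str seq_len)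
  then false
  else true

-- ===== PORT B =====
def is_valid_plus_alt (id : Int) : Bool :=
  let id_str := PySem.Int.toChars id
  !(PySem.Chars.isIn id_str (PySem.List.slice (id_str ++ id_str) (some 1) (some (-1))))

-- ===== PRECONDITION & SPEC =====
def Spec_is_valid_plus (id : Int) (out : Bool) : Prop := out = is_valid_plus_alt id
instance (id : Int) (out : Bool) : Decidable (Spec_is_valid_plus id out) := by unfold Spec_is_valid_plus; infer_instance

-- ===== CLAIM (what is proved, stated in full; the proofs are below) =====
def Claim_equal_is_valid_plus : Prop := ∀ (id : Int), Dom_is_valid_plus id → Spec_is_valid_plus id (is_valid_plus id)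

-- ===== LEMMAS AND PROOFS =====

-- "l is periodic with period k": every position agrees with its residue mod k
def PerP (l : List Char) (k : Nat) : Prop := ∀ j < l.length, l[j]? = l[j % k]?
-- "rotating l by i fixes it"
def RotP (l : List Char) (i : Nat) : Prop := ∀ p < l.length, l[(i + p) % l.length]? = l[p]?

theorem toDigitsCore_len_mono (b : Nat) : ∀ (f n : Nat) (ds : List Char),
    ds.length ≤ (Nat.toDigitsCore b f n ds).length := by
  intro f
  induction f with
  | zero => intro n ds; simp [Nat.toDigitsCore]
  | succ f ih =>
    intro n ds
    simp only [Nat.toDigitsCore]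
    split
    · simp
    · exact le_trans (by simp) (ih _ _)

theorem toChars_len_pos (id : Int) : 1 ≤ (PySem.Int.toChars id).length := by
  unfold PySem.Int.toChars
  split
  · simp
  · show 1 ≤ (Nat.toDigits 10 _).length
    unfold Nat.toDigits
    simp only [Nat.toDigitsCore]
    split
    · simp
    · exact le_trans (by simp) (toDigitsCore_len_mono 10 _ _ _)

-- pointwise characterisation of list prefix
theorem prefix_iff_pointwise (s m : List Char) :
    s <+: m ↔ ∀ p < s.length, m[p]? = s[p]? := by
  constructor
  · rintro ⟨t, rfl⟩ p hp
    simp [List.getElem?_append, hp]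
  · intro h
    rw [List.prefix_iff_eq_take]
    apply List.ext_getElem?
    intro p
    rw [List.getElem?_take]
    by_cases hp : p < s.length
    · rw [if_pos hp]; exact (h p hp).symm
    · rw [if_neg hp]
      exact List.getElem?_eq_none (by omega)

-- membership in the set built by the fold
theorem mem_foldl_add {α : Type} [BEq α] [LawfulBEq α] (f : Int → α) :
    ∀ (xs : List Int) (s0 : PySem.Set α) (y : α),
    y ∈ xs.foldl (fun s x => s.add (f x)) s0 ↔ y ∈ s0 ∨ ∃ x ∈ xs, y = f x := by
  intro xs
  induction xs with
  | nil => simp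
  | cons x xs ih =>
    intro s0 y
    simp only [List.foldl_cons, ih, PySem.Set.mem_add, List.mem_cons]
    constructor
    · rintro (⟨h | h⟩ | ⟨z, hz, rfl⟩)
      · exact Or.inl h
      · exact Or.inr ⟨x, Or.inl rfl, h⟩
      · exact Or.inr ⟨z, Or.inr hz, rfl⟩
    · rintro (h | ⟨z, (rfl | hz), rfl⟩)
      · exact Or.inl (Or.inl h)
      · exact Or.inl (Or.inr rfl)
      · exact Or.inr ⟨z, hz, rfl⟩

theorem nodup_foldl_add {α : Type} [BEq α] [LawfulBEq α] (f : Int → α) :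
    ∀ (xs : List Int) (s0 : PySem.Set α), s0.Nodup →
    (xs.foldl (fun s x => s.add (f x)) s0).Nodup := by
  intro xs
  induction xs with
  | nil => intro s0 h; simpa
  | cons x xs ih =>
    intro s0 h
    refine ih _ ?_
    show (PySem.Set.add s0 (f x)).Nodup
    unfold PySem.Set.add
    split
    · exact h
    · rename_i hc
      simp only [List.nodup_append, h, List.nodup_singleton, true_and]
      intro a ha b hb
      simp only [List.mem_singleton] at hb
      subst hb
      intro hEq
      subst hEq
      exact hc (by simpa using ha)

theorem nodup_singleton_of {α : Type} (s : List α) (a : α) (hnd : s.Nodup)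
    (hmem : a ∈ s) (hall : ∀ y ∈ s, y = a) : s = [a] := by
  cases s with
  | nil => simp at hmem
  | cons b t =>
    have hb : b = a := hall b (by simp)
    subst hb
    have ht : t = [] := by
      cases t with
      | nil => rfl
      | cons c u =>
        have hc : c = b := hall c (by simp)
        subst hc
        simp at hnd
    simp [ht]

-- the dedup-set built over range c is a singleton iff all images agree with the image of 0
theorem fold_len_one_iff {α : Type} [BEq α] [LawfulBEq α] (f : Int → α) (c : Nat) (hc : 0 < c) :
    (List.foldl (fun s x => s.add (f x)) (PySem.Set.ofList [])
      (List.map (fun m : Nat => (m : Int)) (List.range c))).length = 1 ↔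
    ∀ m : Nat, m < c → f (m : Int) = f ((0 : Nat) : Int) := by
  have hmem : ∀ y, y ∈ List.foldl (fun s x => s.add (f x)) (PySem.Set.ofList [])
      (List.map (fun m : Nat => (m : Int)) (List.range c)) ↔ ∃ m : Nat, m < c ∧ y = f (m : Int) := by
    intro y
    rw [mem_foldl_add, PySem.Set.mem_ofList]
    simp only [List.not_mem_nil, false_or, List.mem_map, List.mem_range]
    constructor
    · rintro ⟨x, ⟨m, hm, rfl⟩, rfl⟩
      exact ⟨m, hm, rfl⟩
    · rintro ⟨m, hm, rfl⟩
      exact ⟨(m : Int), ⟨m, hm, rfl⟩, rfl⟩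
  have hnd := nodup_foldl_add f (List.map (fun m : Nat => (m : Int)) (List.range c))
      (PySem.Set.ofList []) (PySem.Set.nodup_ofList [])
  constructor
  · intro hlen m hm
    obtain ⟨a, ha⟩ := List.length_eq_one_iff.mp hlen
    have h1 : f (m : Int) ∈ [a] := ha ▸ (hmem (f (m : Int))).mpr ⟨m, hm, rfl⟩
    have h2 : f ((0 : Nat) : Int) ∈ [a] := ha ▸ (hmem (f ((0 : Nat) : Int))).mpr ⟨0, hc, rfl⟩
    simp only [List.mem_singleton] at h1 h2
    rw [h1, h2]
  · intro hall
    rw [List.length_eq_one_iff]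
    refine ⟨f ((0 : Nat) : Int), nodup_singleton_of _ _ hnd ((hmem _).mpr ⟨0, hc, rfl⟩) ?_⟩
    intro y hy
    obtain ⟨m, hm, rfl⟩ := (hmem y).mp hy
    exact hall m hm

-- indexing a doubled list is indexing mod the length
theorem append_mod (l : List Char) (_hn : 1 ≤ l.length) (q : Nat) (hq : q < 2 * l.length) :
    (l ++ l)[q]? = l[q % l.length]? := by
  rw [List.getElem?_append]
  split
  · rw [Nat.mod_eq_of_lt (by omega)]
  · rename_i h
    have h2 : q % l.length = q - l.length := by
      rw [Nat.mod_eq_sub_mod (by omega), Nat.mod_eq_of_lt (by omega)]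
    rw [h2]

-- the segment-x = segment-0 test is mod-k periodicity
theorem segs_iff (l : List Char) (k : Nat) (hk1 : 1 ≤ k) (hdvd : k ∣ l.length) :
    (∀ x < l.length / k, (l.drop (x * k)).take k = (l.drop (0 * k)).take k) ↔ PerP l k := by
  obtain ⟨c, hc⟩ := hdvd
  have hdivk : l.length / k = c := by
    rw [hc]; exact Nat.mul_div_cancel_left c (by omega)
  constructor
  · intro h j hj
    have hx : j / k < l.length / k := by
      rw [hdivk, Nat.div_lt_iff_lt_mul (show 0 < k by omega)]
      have hj' := hj
      rw [hc, Nat.mul_comm] at hj'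
      exact hj'
    have heq := h (j / k) hx
    have hmk : j % k < k := Nat.mod_lt j (by omega)
    have h1 : ((l.drop (j / k * k)).take k)[j % k]? = l[j]? := by
      rw [List.getElem?_take, if_pos hmk, List.getElem?_drop]
      congr 1
      rw [Nat.mul_comm]
      exact Nat.div_add_mod j k
    have h2 : ((l.drop (0 * k)).take k)[j % k]? = l[j % k]? := by
      rw [List.getElem?_take, if_pos hmk, List.getElem?_drop]
      congr 1
      omega
    rw [← h1, heq, h2]
  · intro hper x hx
    rw [hdivk] at hx
    apply List.ext_getElem?
    intro p
    rw [List.getElem?_take, List.getElem?_take]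
    by_cases hp : p < k
    · rw [if_pos hp, if_pos hp, List.getElem?_drop, List.getElem?_drop]
      have h2 : (x + 1) * k ≤ c * k := Nat.mul_le_mul_right k hx
      have h3 : x * k + k ≤ c * k := by
        have h4 : (x + 1) * k = x * k + k := by ring
        omega
      have h5 : c * k = l.length := by rw [hc, Nat.mul_comm]
      have hlt : x * k + p < l.length := by omega
      have hmod : (x * k + p) % k = p := by
        rw [Nat.add_comm, Nat.add_mul_mod_self_right, Nat.mod_eq_of_lt hp]
      rw [hper (x * k + p) hlt, hmod]
      congr 1
      omega
    · rw [if_neg hp, if_neg hp]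

-- the A-side similar_segments test, characterised
theorem similar_iff (l : List Char) (k : Nat) (hk1 : 1 ≤ k) (hk2 : k ≤ l.length / 2) :
    similar_segments l (k : Int) = true ↔ (k ∣ l.length ∧ PerP l k) := by
  unfold similar_segments
  have hn2 : 2 * k ≤ l.length := by
    have h1 := (Nat.le_div_iff_mul_le (show 0 < 2 by omega)).mp hk2
    omega
  by_cases hdvd : k ∣ l.length
  · have hmod : PySem.Int.mod (l.length : Int) (k : Int) = 0 := by
      rw [PySem.Int.mod_eq_zero_iff_dvd]
      exact_mod_cast hdvd
    simp only [hmod, ne_eq, not_true_eq_false, if_false, PySem.Int.floordiv_natCast,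
      PySem.List.pyRange_zero_natCast]
    have hpos : 0 < l.length / k := by
      have h1 := (Nat.le_div_iff_mul_le (show 0 < k by omega)).mpr (show 1 * k ≤ l.length by omega)
      omega
    have hsegeq : ∀ m : Nat,
        PySem.List.slice l (some ((m : Int) * (k : Int))) (some ((m : Int) * (k : Int) + (k : Int)))
          = (l.drop (m * k)).take k := by
      intro m
      have h1 : ((m : Int) * (k : Int)) = ((m * k : Nat) : Int) := by push_cast; ring
      have h2 : ((m : Int) * (k : Int) + (k : Int)) = ((m * k + k : Nat) : Int) := by push_cast; ring
      rw [h2, h1, PySem.List.slice_natCast]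
      congr 1
      omega
    have hone := fold_len_one_iff
      (fun x : Int => PySem.List.slice l (some (x * (k : Int))) (some (x * (k : Int) + (k : Int))))
      (l.length / k) hpos
    simp only [hsegeq] at hone
    rw [segs_iff l k hk1 hdvd] at hone
    constructor
    · intro h
      split at h
      · rename_i hlen1
        exact ⟨hdvd, hone.mp hlen1⟩
      · simp at h
    · rintro ⟨-, hper⟩
      split
      · rfl
      · rename_i hlen1
        exact absurd (hone.mpr hper) hlen1
  · have hmod : PySem.Int.mod (l.length : Int) (k : Int) ≠ 0 := by
      rw [ne_eq, PySem.Int.mod_eq_zero_iff_dvd]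
      exact_mod_cast hdvd
    simp only [if_pos hmod]
    exact iff_of_false Bool.false_ne_true (fun hcon => hdvd hcon.1)

-- the B-side occurrence test, characterised
theorem occurs_iff (l : List Char) (hn : 1 ≤ l.length) :
    PySem.Chars.isIn l (PySem.List.slice (l ++ l) (some 1) (some (-1))) = true ↔
    ∃ i, 1 ≤ i ∧ i < l.length ∧ RotP l i := by
  have hmid : PySem.List.slice (l ++ l) (some 1) (some (-1)) =
      ((l ++ l).drop 1).take (2 * l.length - 2) := by
    unfold PySem.List.slice PySem.List.clampIdx
    simp only [List.length_append]
    have c1 : ¬ ((1 : Int) < 0) := by omega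
    have c2 : ((-1 : Int) < 0) := by omega
    have c3 : ¬ (((l.length + l.length : Nat) : Int) + -1 < 0) := by
      push_cast
      omega
    simp only [if_neg c1, if_pos c2, if_neg c3]
    have e1 : min ((1 : Int)).toNat (l.length + l.length) = 1 := by
      rw [Int.toNat_one]
      exact Nat.min_eq_left (by omega)
    rw [e1]
    congr 1
    omega
  rw [hmid, ← PySem.Chars.exists_prefix_drop_iff_isIn]
  have hget : ∀ j p, ((((l ++ l).drop 1).take (2 * l.length - 2)).drop j)[p]? =
      if j + p < 2 * l.length - 2 then (l ++ l)[1 + (j + p)]? else none := by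
    intro j p
    rw [List.getElem?_drop, List.getElem?_take]
    split
    · rw [List.getElem?_drop]
    · rfl
  constructor
  · rintro ⟨j, hpre⟩
    have hpw := (prefix_iff_pointwise _ _).mp hpre
    have hlast := hpw (l.length - 1) (by omega)
    rw [hget] at hlast
    have hsome : l[l.length - 1]? ≠ none := by
      rw [List.getElem?_eq_getElem (by omega)]
      simp
    have hjn : j + (l.length - 1) < 2 * l.length - 2 := by
      by_contra h'
      rw [if_neg h'] at hlast
      exact hsome hlast.symm
    refine ⟨j + 1, by omega, by omega, ?_⟩
    intro p hp
    have h3 := hpw p hp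
    rw [hget, if_pos (by omega)] at h3
    rw [append_mod l hn (1 + (j + p)) (by omega)] at h3
    rw [show (j + 1) + p = 1 + (j + p) from by omega]
    exact h3
  · rintro ⟨i, hi1, hi2, hrot⟩
    refine ⟨i - 1, ?_⟩
    rw [prefix_iff_pointwise]
    intro p hp
    rw [hget, if_pos (by omega)]
    rw [append_mod l hn (1 + ((i - 1) + p)) (by omega)]
    rw [show 1 + ((i - 1) + p) = i + p from by omega]
    exact hrot p hp

-- Bezout: some multiple of i is congruent to gcd i n mod n
theorem bezout_mod (i n : Nat) (hn : 0 < n) :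
    ∃ m : Nat, (m * i) % n = Nat.gcd i n % n := by
  refine ⟨((Nat.gcdA i n) % (n : Int)).toNat, ?_⟩
  have hnz : ((n : Nat) : Int) ≠ 0 := by exact_mod_cast hn.ne'
  have hA : ((((Nat.gcdA i n) % (n : Int)).toNat : Nat) : Int) = (Nat.gcdA i n) % (n : Int) :=
    Int.toNat_of_nonneg (Int.emod_nonneg _ hnz)
  have key : (((((Nat.gcdA i n) % (n : Int)).toNat) * i : Nat) : Int) % (n : Int) =
      ((Nat.gcd i n : Nat) : Int) % (n : Int) := by
    rw [Nat.cast_mul, hA, Int.mul_emod, Int.emod_emod_of_dvd _ dvd_rfl, ← Int.mul_emod]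
    have hg := Nat.gcd_eq_gcd_ab i n
    have h2 : (Nat.gcdA i n) * (i : Int) = (Nat.gcd i n : Int) + (n : Int) * (-(Nat.gcdB i n)) := by
      rw [hg]; ring
    rw [h2, Int.add_mul_emod_self_left]
  rw [← Int.natCast_mod, ← Int.natCast_mod] at key
  exact_mod_cast key

-- the arithmetic heart: rotation-fixing index ↔ proper divisor period
theorem rot_iff_per (l : List Char) (hn : 1 ≤ l.length) :
    (∃ i, 1 ≤ i ∧ i < l.length ∧ RotP l i) ↔
    (∃ k, 1 ≤ k ∧ k ≤ l.length / 2 ∧ k ∣ l.length ∧ PerP l k) := by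
  constructor
  · rintro ⟨i, hi1, hi2, hrot⟩
    have hstep : ∀ q, l[(q + i) % l.length]? = l[q % l.length]? := by
      intro q
      have hp : q % l.length < l.length := Nat.mod_lt _ (by omega)
      have hq1 : Nat.ModEq l.length q (q % l.length) := (Nat.mod_mod_of_dvd q dvd_rfl).symm
      have h3 : (i + q) % l.length = (i + q % l.length) % l.length := hq1.add_left i
      have h1 : (q + i) % l.length = (i + q % l.length) % l.length := by
        rw [Nat.add_comm q i]; exact h3
      rw [h1]
      exact hrot (q % l.length) hp
    have hmul : ∀ m q, l[(q + m * i) % l.length]? = l[q % l.length]? := by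
      intro m
      induction m with
      | zero => intro q; simp
      | succ m ih =>
        intro q
        rw [show q + (m + 1) * i = (q + m * i) + i from by ring, hstep (q + m * i)]
        exact ih q
    obtain ⟨m, hm⟩ := bezout_mod i l.length (by omega)
    set g := Nat.gcd i l.length with hgdef
    have hg1 : 1 ≤ g := Nat.gcd_pos_of_pos_left l.length (by omega)
    have hgd : g ∣ l.length := Nat.gcd_dvd_right i l.length
    have hgi : g ≤ i := Nat.le_of_dvd (by omega) (Nat.gcd_dvd_left i l.length)
    have hg2 : g ≤ l.length / 2 := by
      obtain ⟨c, hc⟩ := hgd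
      have hc2 : 2 ≤ c := by
        rcases Nat.lt_or_ge c 2 with hlt | hge
        · interval_cases c <;> omega
        · exact hge
      have h3 : g * 2 ≤ g * c := Nat.mul_le_mul_left g hc2
      rw [Nat.le_div_iff_mul_le (show 0 < 2 by omega)]
      omega
    have hgq : ∀ q, l[(q + g) % l.length]? = l[q % l.length]? := by
      intro q
      have h1 : (q + g) % l.length = (q + m * i) % l.length := by
        rw [Nat.add_mod q g, Nat.add_mod q (m * i), hm]
      rw [h1]
      exact hmul m q
    have hper0 : ∀ j, l[j % l.length]? = l[j % g % l.length]? := by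
      intro j
      induction j using Nat.strong_induction_on with
      | _ j ih =>
        by_cases hj : j < g
        · rw [Nat.mod_eq_of_lt hj]
        · rw [show j = (j - g) + g from by omega, hgq (j - g), Nat.add_mod_right,
            ih (j - g) (by omega)]
    refine ⟨g, hg1, hg2, hgd, ?_⟩
    intro j hj
    have h1 := hper0 j
    rw [Nat.mod_eq_of_lt hj] at h1
    have h2 : j % g < l.length :=
      lt_of_lt_of_le (Nat.mod_lt j (by omega)) (Nat.le_of_dvd (by omega) hgd)
    rw [Nat.mod_eq_of_lt h2] at h1
    exact h1
  · rintro ⟨k, hk1, hk2, hkd, hper⟩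
    refine ⟨k, hk1, by omega, ?_⟩
    intro p hp
    have h1 : (k + p) % l.length < l.length := Nat.mod_lt _ (by omega)
    rw [hper ((k + p) % l.length) h1, hper p hp, Nat.mod_mod_of_dvd _ hkd, Nat.add_mod_left]

-- ===== VERDICT (by name: the statement is the Claim_ definition above) =====
theorem is_valid_plus_spec : Claim_equal_is_valid_plus := by
  intro id _
  unfold Spec_is_valid_plus is_valid_plus is_valid_plus_alt
  set l := PySem.Int.toChars id with hl
  have hn : 1 ≤ l.length := toChars_len_pos id
  have hmax : PySem.Int.floordiv (l.length : Int) 2 = ((l.length / 2 : Nat) : Int) := by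
    exact_mod_cast PySem.Int.floordiv_natCast l.length 2
  have hany : (PySem.List.pyRange 1 (PySem.Int.floordiv (l.length : Int) 2 + 1) 1).any
      (fun seq_len => similar_segments l seq_len) = true ↔
      ∃ k, 1 ≤ k ∧ k ≤ l.length / 2 ∧ k ∣ l.length ∧ PerP l k := by
    rw [List.any_eq_true]
    constructor
    · rintro ⟨ki, hki, hsim⟩
      rw [PySem.List.mem_pyRange_one, hmax] at hki
      obtain ⟨k, rfl⟩ := Int.eq_ofNat_of_zero_le (show (0 : Int) ≤ ki by omega)
      have hk1 : 1 ≤ k := by exact_mod_cast hki.1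
      have hk2 : k ≤ l.length / 2 := by
        have h2 := hki.2
        omega
      obtain ⟨hd, hp⟩ := (similar_iff l k hk1 hk2).mp hsim
      exact ⟨k, hk1, hk2, hd, hp⟩
    · rintro ⟨k, hk1, hk2, hd, hp⟩
      refine ⟨(k : Int), ?_, (similar_iff l k hk1 hk2).mpr ⟨hd, hp⟩⟩
      rw [PySem.List.mem_pyRange_one, hmax]
      refine ⟨?_, ?_⟩
      · exact_mod_cast hk1
      · omega
  have hB := (occurs_iff l hn).trans (rot_iff_per l hn)
  have hA : ((PySem.List.pyRange 1 (PySem.Int.floordiv (l.length : Int) 2 + 1) 1).any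
      (fun seq_len => similar_segments l seq_len)) =
      PySem.Chars.isIn l (PySem.List.slice (l ++ l) (some 1) (some (-1))) := by
    rw [Bool.eq_iff_iff, hany]
    exact hB.symm
  dsimp only
  rw [hA]
  cases PySem.Chars.isIn l (PySem.List.slice (l ++ l) (some 1) (some (-1))) <;> simp
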